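-- pv_equiv track=rewrite | github.com/luisriq/redes4 | binarizacion.py | binarizar
-- ===== SOURCE A (Python) =====
-- def binarizar(signal,themaczimo):
-- 	binarysignal =[]
-- 	for index,i in enumerate(signal):
-- 		if((index+1)*16>themaczimo):
-- 			break
-- 		signo = (1,0)[i>0]
-- 		aux = abs(i)
-- 		#number = []
-- 		for j in range(15):
-- 			#number.append(aux&1)
-- 			binarysignal.append(aux&1)
-- 			aux = aux >> 1
-- 		#number.append(signo)
-- 		binarysignal.append(signo)
-- 	return binarysignal
-- ===== SOURCE B (Python) =====
-- def binarizar(senal, themaczimo):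
--     # closed-form cut instead of break; string formatting instead of shift/mask loop
--     k = max(0, min(len(senal), themaczimo // 16))
--     out = []
--     for i in senal[:k]:
--         bits = format(abs(i) % 32768, '015b')
--         out.extend(int(c) for c in reversed(bits))
--         out.append(0 if i > 0 else 1)
--     return out
-- ===== Notes on version B (the rewrite author's own statement) =====
-- stated objective: idiomatic
-- what changed: The break-driven enumerate loop becomes a closed-form slice bound (themaczimo//16) and the 15-iteration shift/mask inner loop becomes binary string formatting (format(abs(i)%32768,'015b') reversed).
import Mathlib
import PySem

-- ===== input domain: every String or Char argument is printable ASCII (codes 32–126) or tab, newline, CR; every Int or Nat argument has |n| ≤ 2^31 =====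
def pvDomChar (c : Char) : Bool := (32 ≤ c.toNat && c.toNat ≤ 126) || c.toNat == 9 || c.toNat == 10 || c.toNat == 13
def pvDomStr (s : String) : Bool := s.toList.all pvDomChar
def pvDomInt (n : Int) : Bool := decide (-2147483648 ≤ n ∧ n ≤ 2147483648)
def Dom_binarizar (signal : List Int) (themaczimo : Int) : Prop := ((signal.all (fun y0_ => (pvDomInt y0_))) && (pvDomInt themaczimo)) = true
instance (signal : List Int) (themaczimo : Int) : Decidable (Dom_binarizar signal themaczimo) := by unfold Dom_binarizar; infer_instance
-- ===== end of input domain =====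

-- B replaces the break-driven enumerate loop by a closed-form slice bound and the
-- 15-step shift/mask inner loop by binary string formatting (idiomatic, not faster).

-- ===== PORT A =====
-- the enumerate loop with break; the inner for-j loop is the foldl over range(15),
-- whose state is (binarysignal, aux)
def binarizarGo (themaczimo : Int) : List (Int × Int) → List Int → List Int
  | [], acc => acc
  | (index, i) :: rest, acc =>
    if (index + 1) * 16 > themaczimo then acc
    else
      let signo : Int := if i > 0 then 0 else 1
      let st := (PySem.List.pyRange 0 15 1).foldl
        (fun (st : List Int × Int) _ => (st.1 ++ [Int.land st.2 1], Int.shiftRight st.2 1))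
        (acc, |i|)
      binarizarGo themaczimo rest (st.1 ++ [signo])

def binarizar (signal : List Int) (themaczimo : Int) : List Int :=
  binarizarGo themaczimo (PySem.List.enumerate signal 0) []

-- ===== PORT B =====
-- format(m, '015b') is ported as the zero-padded MSB-first binary digit list of m
-- (exact for 0 ≤ m < 2^15: toBin is repeated divmod-by-2, MSB first, like the format)
def toBin (n : Nat) : List Int :=
  if h : n = 0 then [] else toBin (n / 2) ++ [((n % 2 : Nat) : Int)]
decreasing_by exact Nat.div_lt_self (Nat.pos_of_ne_zero h) (by omega)

def binarizar_alt (signal : List Int) (themaczimo : Int) : List Int :=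
  let k : Nat := (max 0 (min (signal.length : Int) (PySem.Int.floordiv themaczimo 16))).toNat
  (signal.take k).foldl (fun out i =>
    let m : Nat := (|i|).toNat % 32768
    let bits : List Int := List.replicate (15 - (toBin m).length) 0 ++ toBin m
    out ++ (bits.reverse ++ [if i > 0 then 0 else 1])) []

-- ===== PRECONDITION & SPEC =====
def Spec_binarizar (signal : List Int) (themaczimo : Int) (out : List Int) : Prop := out = binarizar_alt signal themaczimo
instance (signal : List Int) (themaczimo : Int) (out : List Int) : Decidable (Spec_binarizar signal themaczimo out) := by unfold Spec_binarizar; infer_instance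

-- ===== CLAIM (what is proved, stated in full; the proofs are below) =====
def Claim_equal_binarizar : Prop := ∀ (signal : List Int) (themaczimo : Int), Dom_binarizar signal themaczimo → Spec_binarizar signal themaczimo (binarizar signal themaczimo)

-- ===== LEMMAS AND PROOFS =====

-- the LSB-first bit list the inner loops produce, on Int and on Nat
def pvF : Nat → Int → List Int
  | 0, _ => []
  | k+1, a => Int.land a 1 :: pvF k (Int.shiftRight a 1)

def pvG : Nat → Nat → List Int
  | 0, _ => []
  | k+1, n => ((n % 2 : Nat) : Int) :: pvG k (n / 2)

theorem pvInner (l : List Int) : ∀ (acc : List Int) (a : Int),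
    (l.foldl (fun (st : List Int × Int) _ => (st.1 ++ [Int.land st.2 1], Int.shiftRight st.2 1)) (acc, a)).1
      = acc ++ pvF l.length a := by
  induction l with
  | nil => intro acc a; simp [pvF]
  | cons x l ih =>
      intro acc a
      simp only [List.foldl_cons, List.length_cons, pvF, ih]
      simp

theorem pvFG : ∀ (k n : Nat), pvF k (n : Int) = pvG k n := by
  intro k
  induction k with
  | zero => intro n; rfl
  | succ k ih =>
      intro n
      show Int.land (n : Int) 1 :: pvF k (Int.shiftRight (n : Int) 1) = _
      have h1 : Int.land (n : Int) 1 = ((n % 2 : Nat) : Int) := by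
        show ((n &&& 1 : Nat) : Int) = _
        rw [Nat.and_one_is_mod]
      have h2 : Int.shiftRight (n : Int) 1 = ((n / 2 : Nat) : Int) := by
        show ((n >>> 1 : Nat) : Int) = _
        rw [Nat.shiftRight_eq_div_pow, pow_one]
      rw [h1, h2, ih]
      rfl

theorem toBin_zero : toBin 0 = [] := by simp [toBin]

theorem toBin_pos (m : Nat) (h : m ≠ 0) :
    toBin m = toBin (m / 2) ++ [((m % 2 : Nat) : Int)] := by
  rw [toBin, dif_neg h]

theorem pvDiv2Mod (n k : Nat) : (n % 2 ^ (k + 1)) / 2 = (n / 2) % 2 ^ k := by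
  obtain ⟨q, r, hr, hn⟩ : ∃ q r, r < 2 ^ (k + 1) ∧ n = 2 ^ (k + 1) * q + r :=
    ⟨n / 2 ^ (k + 1), n % 2 ^ (k + 1), Nat.mod_lt _ (by positivity), (Nat.div_add_mod n _).symm⟩
  subst hn
  have hp : (2:Nat) ^ (k + 1) = 2 * 2 ^ k := by rw [pow_succ]; ring
  rw [Nat.mul_add_mod, Nat.mod_eq_of_lt hr]
  have hr2 : r < 2 * 2 ^ k := hp ▸ hr
  have hcomm : 2 ^ (k + 1) * q + r = r + 2 * (2 ^ k * q) := by rw [hp]; ring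
  rw [hcomm, Nat.add_mul_div_left _ _ (by omega : 0 < 2)]
  have hc2 : r / 2 + 2 ^ k * q = r / 2 + q * 2 ^ k := by ring
  rw [hc2, Nat.add_mul_mod_self_right, Nat.mod_eq_of_lt (by omega : r / 2 < 2 ^ k)]

theorem pvMod2Mod (n k : Nat) : (n % 2 ^ (k + 1)) % 2 = n % 2 :=
  Nat.mod_mod_of_dvd n ⟨2 ^ k, by ring⟩

theorem pvG_mod : ∀ (k n : Nat), pvG k (n % 2 ^ k) = pvG k n := by
  intro k
  induction k with
  | zero => intro n; rfl
  | succ k ih =>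
      intro n
      show ((_ % 2 : Nat) : Int) :: pvG k _ = ((n % 2 : Nat) : Int) :: pvG k (n / 2)
      rw [pvMod2Mod, pvDiv2Mod, ih]

theorem toBin_pad : ∀ (k m : Nat), m < 2 ^ k →
    (List.replicate (k - (toBin m).length) (0:Int) ++ toBin m).reverse = pvG k m := by
  intro k
  induction k with
  | zero =>
      intro m hm
      interval_cases m
      rw [toBin_zero]
      rfl
  | succ k ih =>
      intro m hm
      by_cases h0 : m = 0
      · subst h0
        have hz : pvG k 0 = List.replicate k (0:Int) := by
          have h := ih 0 (by positivity)
          rw [toBin_zero] at h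
          simpa using h.symm
        rw [toBin_zero]
        simp only [List.append_nil, List.length_nil, Nat.sub_zero, List.reverse_replicate]
        have hG : pvG (k + 1) 0 = ((0 % 2 : Nat) : Int) :: pvG k (0 / 2) := rfl
        rw [hG, hz]
        norm_num [List.replicate_succ]
      · have hm2 : m / 2 < 2 ^ k := by
          rw [Nat.div_lt_iff_lt_mul (by omega : 0 < 2), ← pow_succ]
          exact hm
        rw [toBin_pos m h0]
        have hlen : (toBin (m / 2) ++ [((m % 2 : Nat) : Int)]).length = (toBin (m / 2)).length + 1 := by
          simp
        rw [hlen]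
        have hsub : k + 1 - ((toBin (m / 2)).length + 1) = k - (toBin (m / 2)).length := by omega
        rw [hsub, ← List.append_assoc, List.reverse_append]
        show ((m % 2 : Nat) : Int) :: (List.replicate _ (0:Int) ++ toBin (m / 2)).reverse
            = pvG (k+1) m
        rw [ih (m / 2) hm2]
        rfl

theorem go_acc (t : Int) : ∀ (l : List (Int × Int)) (acc : List Int),
    binarizarGo t l acc = acc ++ binarizarGo t l [] := by
  intro l
  induction l with
  | nil => intro acc; simp [binarizarGo]
  | cons p rest ih =>
      intro acc
      obtain ⟨index, i⟩ := p
      rw [binarizarGo, binarizarGo]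
      by_cases hc : (index + 1) * 16 > t
      · rw [if_pos hc, if_pos hc]; simp
      · rw [if_neg hc, if_neg hc]
        simp only [pvInner]
        rw [ih, ih ([] ++ pvF (PySem.List.pyRange 0 15 1).length |i| ++ [if i > 0 then 0 else 1])]
        simp

-- the per-element block both programs emit
def pvBlock (i : Int) : List Int := pvF 15 |i| ++ [if i > 0 then 0 else 1]

theorem go_blocks (t : Int) : ∀ (signal : List Int) (s : Int),
    binarizarGo t (PySem.List.enumerate signal s) []
      = (signal.take ((PySem.Int.floordiv t 16) - s).toNat).flatMap pvBlock := by
  have hK : PySem.Int.floordiv t 16 = t / 16 := PySem.Int.floordiv_eq_ediv_of_pos (by omega)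
  intro signal
  induction signal with
  | nil => intro s; simp [PySem.List.enumerate, binarizarGo]
  | cons i sig ih =>
      intro s
      rw [PySem.List.enumerate_cons, binarizarGo]
      by_cases hc : (s + 1) * 16 > t
      · rw [if_pos hc]
        have : ((PySem.Int.floordiv t 16) - s).toNat = 0 := by rw [hK]; omega
        rw [this]
        simp
      · rw [if_neg hc]
        simp only [pvInner, List.nil_append]
        have hlen : (PySem.List.pyRange 0 15 1).length = 15 := by decide
        rw [hlen, go_acc, ih (s + 1)]
        have hn : ((PySem.Int.floordiv t 16) - s).toNat
            = ((PySem.Int.floordiv t 16) - (s + 1)).toNat + 1 := by rw [hK]; omega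
        rw [hn, List.take_succ_cons, List.flatMap_cons]
        rfl

theorem block_eq (i : Int) :
    (List.replicate (15 - (toBin ((|i|).toNat % 32768)).length) (0:Int)
        ++ toBin ((|i|).toNat % 32768)).reverse ++ [if i > 0 then (0:Int) else 1]
      = pvBlock i := by
  have h32 : (32768 : Nat) = 2 ^ 15 := by norm_num
  have hlt : (|i|).toNat % 32768 < 2 ^ 15 := by rw [← h32]; exact Nat.mod_lt _ (by omega)
  rw [toBin_pad 15 _ hlt]
  have : pvG 15 ((|i|).toNat % 32768) = pvG 15 (|i|).toNat := by
    rw [h32]; exact pvG_mod 15 _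
  rw [this, ← pvFG]
  have habs : (((|i|).toNat : Nat) : Int) = |i| := Int.toNat_of_nonneg (abs_nonneg i)
  rw [habs]
  rfl

theorem take_bound (signal : List Int) (K : Int) :
    signal.take ((max 0 (min (signal.length : Int) K)).toNat) = signal.take K.toNat := by
  have h : (max 0 (min (signal.length : Int) K)).toNat = min signal.length K.toNat := by omega
  rw [h]
  rcases le_total K.toNat signal.length with hle | hle
  · rw [Nat.min_eq_right hle]
  · rw [Nat.min_eq_left hle, List.take_of_length_le hle, List.take_of_length_le (Nat.le_refl _)]

theorem alt_blocks (signal : List Int) (t : Int) :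
    binarizar_alt signal t = (signal.take ((PySem.Int.floordiv t 16)).toNat).flatMap pvBlock := by
  simp only [binarizar_alt]
  rw [take_bound signal (PySem.Int.floordiv t 16)]
  generalize signal.take (PySem.Int.floordiv t 16).toNat = l
  induction l using List.reverseRecOn with
  | nil => rfl
  | append_singleton l x ih =>
      rw [List.foldl_append, List.foldl_cons, List.foldl_nil, ih, List.flatMap_append,
        List.flatMap_cons, List.flatMap_nil, List.append_nil, block_eq]

-- ===== VERDICT (by name: the statement is the Claim_ definition above) =====
theorem binarizar_spec : Claim_equal_binarizar := by
  intro signal t _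
  show binarizar signal t = binarizar_alt signal t
  rw [binarizar, go_blocks t signal 0, alt_blocks]
  norm_num
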